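-- pv_equiv track=rewrite | github.com/ShaunFerris/Advent-of-Code | 2021/7/7.py | calc_convergence
-- ===== SOURCE A (Python) =====
-- def calc_convergence(map):
--     '''Takes the mapped positions of all the subs and iterates
--     through, calculating the fuel that would be spent to move all subs
--     to the current position. Returns which position to converge on for
--     the lowest fuel consumption.'''
--
--     destination_by_fuel_cost = {}
--     for destination in map.keys():
--         for start, count in map.items():
--             if start == destination:
--                 continue
--             else:
--                 distance = abs(start - destination)
--                 fuel_cost = distance * count
--                 destination_by_fuel_cost[destination] = destination_by_fuel_cost.get(destination, 0) + fuel_cost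
--     return destination_by_fuel_cost
-- ===== SOURCE B (Python) =====
-- def calc_convergence(map):
--     '''Prefix-sum re-implementation: sort the positions once, then compute each
--     destination's total weighted distance from running (count, weighted-position)
--     prefix sums instead of re-scanning all subs per destination.'''
--     items = sorted(map.items(), key=lambda kv: kv[0])
--     total_c = 0
--     total_w = 0
--     for p, c in items:
--         total_c += c
--         total_w += p * c
--     if len(items) < 2:
--         return {}
--     cost = {}
--     left_c = 0
--     left_w = 0
--     for p, c in items:
--         left_c += c
--         left_w += p * c
--         cost[p] = p * left_c - left_w + (total_w - left_w) - p * (total_c - left_c)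
--     return {d: cost[d] for d in map}
-- ===== Notes on version B (the rewrite author's own statement) =====
-- stated objective: faster
-- what changed: Instead of rescanning all positions for every destination (nested loops), B sorts the positions once and computes each destination's total weighted distance from running prefix sums of counts and weighted positions.
import Mathlib
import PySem

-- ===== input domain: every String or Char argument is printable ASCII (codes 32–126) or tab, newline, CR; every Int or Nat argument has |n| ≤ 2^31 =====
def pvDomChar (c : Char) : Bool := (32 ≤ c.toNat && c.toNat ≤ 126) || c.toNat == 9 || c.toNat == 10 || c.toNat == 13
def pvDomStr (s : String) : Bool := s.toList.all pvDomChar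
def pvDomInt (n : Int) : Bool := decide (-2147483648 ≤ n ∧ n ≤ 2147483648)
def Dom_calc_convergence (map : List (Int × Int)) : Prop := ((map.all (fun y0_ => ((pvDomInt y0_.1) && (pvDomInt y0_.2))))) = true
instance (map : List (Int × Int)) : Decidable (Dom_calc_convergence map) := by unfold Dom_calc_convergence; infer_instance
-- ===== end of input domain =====

-- B replaces A's quadratic per-destination rescan by one sort plus running prefix sums.

-- ===== PORT A =====
-- literal port of A: the assoc-list argument is marshalled to a Python dict
-- (PySem.Dict.ofList = dict(pairs)), then the nested loops accumulate fuel per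
-- destination via dict.get(destination, 0).
def calc_convergence (map : List (Int × Int)) : List (Int × Int) :=
  let d := PySem.Dict.ofList map
  let res := d.keys.foldl (fun acc destination =>
      d.items.foldl (fun acc2 (p : Int × Int) =>
        if p.1 == destination then acc2
        else acc2.insert destination (acc2.getD destination 0 + |p.1 - destination| * p.2))
        acc)
    (PySem.Dict.empty : PySem.Dict Int Int)
  res.items

-- ===== PORT B =====
-- literal port of Source B: sort items by position, total sums, then one pass with
-- running prefix sums; cost[d] is ported as getD (cost holds every key of map,
-- so the Python lookup never raises and getD is exact there).
def calc_convergence_alt (map : List (Int × Int)) : List (Int × Int) :=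
  let d := PySem.Dict.ofList map
  let items := PySem.List.sorted d.items (fun kv => kv.1) false
  let tot := items.foldl (fun (t : Int × Int) pc => (t.1 + pc.2, t.2 + pc.1 * pc.2)) ((0 : Int), (0 : Int))
  if items.length < 2 then []
  else
    let cost := (items.foldl
      (fun (st : PySem.Dict Int Int × Int × Int) pc =>
        let lc := st.2.1 + pc.2
        let lw := st.2.2 + pc.1 * pc.2
        (st.1.insert pc.1 (pc.1 * lc - lw + (tot.2 - lw) - pc.1 * (tot.1 - lc)), lc, lw))
      ((PySem.Dict.empty : PySem.Dict Int Int), (0 : Int), (0 : Int))).1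
    d.keys.map (fun k => (k, cost.getD k 0))

-- ===== PRECONDITION & SPEC =====
def Spec_calc_convergence (map : List (Int × Int)) (out : List (Int × Int)) : Prop := out = calc_convergence_alt map
instance (map : List (Int × Int)) (out : List (Int × Int)) : Decidable (Spec_calc_convergence map out) := by unfold Spec_calc_convergence; infer_instance

-- ===== CLAIM (what is proved, stated in full; the proofs are below) =====
def Claim_equal_calc_convergence : Prop := ∀ (map : List (Int × Int)), Dom_calc_convergence map → Spec_calc_convergence map (calc_convergence map)

-- ===== LEMMAS AND PROOFS =====

def sumAbs (k : Int) (l : List (Int × Int)) : Int := (l.map (fun p => |p.1 - k| * p.2)).sum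
def sumC (l : List (Int × Int)) : Int := (l.map (·.2)).sum
def sumW (l : List (Int × Int)) : Int := (l.map (fun p => p.1 * p.2)).sum

def innerStep (k : Int) (acc2 : PySem.Dict Int Int) (p : Int × Int) : PySem.Dict Int Int :=
  if p.1 == k then acc2
  else acc2.insert k (acc2.getD k 0 + |p.1 - k| * p.2)

theorem inner_after (k : Int) (l : List (Int × Int)) :
    ∀ (acc : PySem.Dict Int Int) (v : Int),
      l.foldl (innerStep k) (acc.insert k v) = acc.insert k (v + sumAbs k l) := by
  induction l with
  | nil => intro acc v; simp [sumAbs]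
  | cons p t ih =>
    intro acc v
    by_cases hp : p.1 == k
    · have hpk : p.1 = k := by exact_mod_cast eq_of_beq hp
      rw [List.foldl_cons, innerStep, if_pos hp, ih]
      simp only [sumAbs, List.map_cons, List.sum_cons, hpk, sub_self, abs_zero, zero_mul, zero_add]
    · rw [List.foldl_cons, innerStep, if_neg hp, PySem.Dict.getD_insert_self,
        PySem.Dict.insert_insert_self, ih]
      simp only [sumAbs, List.map_cons, List.sum_cons]
      rw [add_assoc]

theorem inner_fresh (k : Int) (l : List (Int × Int)) :
    ∀ (acc : PySem.Dict Int Int), acc.contains k = false →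
      l.foldl (innerStep k) acc =
        if l.all (fun p => p.1 == k) then acc else acc.insert k (sumAbs k l) := by
  induction l with
  | nil => intro acc _; simp
  | cons p t ih =>
    intro acc hacc
    by_cases hp : p.1 == k
    · have hpk : p.1 = k := by exact_mod_cast eq_of_beq hp
      rw [List.foldl_cons, innerStep, if_pos hp, ih acc hacc]
      simp only [List.all_cons, sumAbs, List.map_cons, List.sum_cons,
        hpk, sub_self, abs_zero, zero_mul, zero_add, beq_self_eq_true, Bool.true_and]
    · rw [List.foldl_cons, innerStep, if_neg hp, PySem.Dict.getD_of_not_contains _ _ hacc,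
        zero_add, inner_after]
      have hp' : (p.1 == k) = false := by simpa using hp
      simp only [List.all_cons, hp', Bool.false_and, Bool.false_eq_true, if_false,
        sumAbs, List.map_cons, List.sum_cons]

theorem outer_items (items : List (Int × Int)) (ks : List Int) :
    ∀ (acc : PySem.Dict Int Int), ks.Nodup → (∀ k ∈ ks, acc.contains k = false) →
      (ks.foldl (fun acc dest => items.foldl (innerStep dest) acc) acc).items
        = acc.items ++ ks.filterMap (fun k =>
            if items.all (fun p => p.1 == k) then none else some (k, sumAbs k items)) := by
  induction ks with
  | nil => intro acc _ _; simp
  | cons k kt ih =>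
    intro acc hnd hfresh
    have hk : acc.contains k = false := hfresh k (by simp)
    rw [List.foldl_cons, inner_fresh k items acc hk]
    by_cases hall : items.all (fun p => p.1 == k)
    · rw [if_pos hall, ih acc hnd.of_cons (fun j hj => hfresh j (by simp [hj])),
        List.filterMap_cons]
      simp [hall]
    · rw [if_neg hall]
      have hfresh' : ∀ j ∈ kt, (acc.insert k (sumAbs k items)).contains j = false := by
        intro j hj
        rw [PySem.Dict.contains_insert]
        have hjk : j ≠ k := by rintro rfl; exact (List.nodup_cons.mp hnd).1 hj
        simp [hjk, hfresh j (by simp [hj])]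
      rw [ih _ hnd.of_cons hfresh', PySem.Dict.items_insert_of_not_contains _ _ hk,
        List.filterMap_cons]
      simp [hall]

-- ===== B side =====
def bStep (tc tw : Int) (st : PySem.Dict Int Int × Int × Int) (pc : Int × Int) :
    PySem.Dict Int Int × Int × Int :=
  let lc := st.2.1 + pc.2
  let lw := st.2.2 + pc.1 * pc.2
  (st.1.insert pc.1 (pc.1 * lc - lw + (tw - lw) - pc.1 * (tc - lc)), lc, lw)

theorem bstep_snd (tc tw : Int) (l : List (Int × Int)) :
    ∀ s : PySem.Dict Int Int × Int × Int,
      (l.foldl (bStep tc tw) s).2 = (s.2.1 + sumC l, s.2.2 + sumW l) := by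
  induction l with
  | nil => intro s; simp [sumC, sumW]
  | cons p t ih =>
    intro s
    rw [List.foldl_cons, ih]
    simp only [bStep, sumC, sumW, List.map_cons, List.sum_cons]
    exact Prod.ext (by ring) (by ring)

theorem bstep_untouched (tc tw : Int) (l : List (Int × Int)) (k : Int) :
    ∀ s : PySem.Dict Int Int × Int × Int, k ∉ l.map (·.1) →
      ((l.foldl (bStep tc tw) s).1).getD k 0 = s.1.getD k 0 := by
  induction l with
  | nil => intro s _; rfl
  | cons p t ih =>
    intro s hk
    simp only [List.map_cons, List.mem_cons, not_or] at hk
    rw [List.foldl_cons, ih _ hk.2, bStep]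
    exact PySem.Dict.getD_insert_of_ne _ _ _ hk.1

theorem tot_foldl (l : List (Int × Int)) :
    ∀ s : Int × Int,
      l.foldl (fun (t : Int × Int) pc => (t.1 + pc.2, t.2 + pc.1 * pc.2)) s
        = (s.1 + sumC l, s.2 + sumW l) := by
  induction l with
  | nil => intro s; simp [sumC, sumW]
  | cons p t ih =>
    intro s
    rw [List.foldl_cons, ih]
    simp only [sumC, sumW, List.map_cons, List.sum_cons]
    exact Prod.ext (by ring) (by ring)

theorem cost_split (tc tw : Int) (p : Int × Int) (L R : List (Int × Int)) (hk : p.1 ∉ R.map (·.1))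
    (s : PySem.Dict Int Int × Int × Int) :
    (((L ++ p :: R).foldl (bStep tc tw) s).1).getD p.1 0
      = p.1 * (s.2.1 + sumC L + p.2) - (s.2.2 + sumW L + p.1 * p.2)
        + (tw - (s.2.2 + sumW L + p.1 * p.2)) - p.1 * (tc - (s.2.1 + sumC L + p.2)) := by
  rw [List.foldl_append, List.foldl_cons, bstep_untouched _ _ _ _ _ hk]
  have h2 := bstep_snd tc tw L s
  simp only [bStep, PySem.Dict.getD_insert_self, h2]

theorem sumAbs_le (k : Int) (L : List (Int × Int)) (h : ∀ p ∈ L, p.1 ≤ k) :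
    sumAbs k L = k * sumC L - sumW L := by
  induction L with
  | nil => simp [sumAbs, sumC, sumW]
  | cons p t ih =>
    have hp := h p (by simp)
    have : |p.1 - k| = k - p.1 := by rw [abs_of_nonpos (by omega)]; ring
    simp only [sumAbs, sumC, sumW, List.map_cons, List.sum_cons] at *
    rw [this, ih (fun q hq => h q (by simp [hq]))]
    ring

theorem sumAbs_ge (k : Int) (R : List (Int × Int)) (h : ∀ p ∈ R, k ≤ p.1) :
    sumAbs k R = sumW R - k * sumC R := by
  induction R with
  | nil => simp [sumAbs, sumC, sumW]
  | cons p t ih =>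
    have hp := h p (by simp)
    have : |p.1 - k| = p.1 - k := abs_of_nonneg (by omega)
    simp only [sumAbs, sumC, sumW, List.map_cons, List.sum_cons] at *
    rw [this, ih (fun q hq => h q (by simp [hq]))]
    ring

theorem filterMap_eq_map_of_cond {g : Int → Int} (ks : List Int)
    (cond : Int → Bool) (h : ∀ k ∈ ks, cond k = false) :
    ks.filterMap (fun k => if cond k then none else some (k, g k))
      = ks.map (fun k => (k, g k)) := by
  induction ks with
  | nil => rfl
  | cons k t ih =>
    rw [List.filterMap_cons, List.map_cons, h k (by simp), ih (fun j hj => h j (by simp [hj]))]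
    simp

theorem portA_eq (map : List (Int × Int)) :
    calc_convergence map
      = ((PySem.Dict.ofList map).keys.foldl
          (fun acc dest => (PySem.Dict.ofList map).items.foldl (innerStep dest) acc)
          (PySem.Dict.empty : PySem.Dict Int Int)).items := rfl

theorem portB_eq (map : List (Int × Int)) :
    calc_convergence_alt map
      = (if (PySem.List.sorted (PySem.Dict.ofList map).items (fun kv => kv.1) false).length < 2 then []
         else (PySem.Dict.ofList map).keys.map (fun k => (k,
           (((PySem.List.sorted (PySem.Dict.ofList map).items (fun kv => kv.1) false).foldl
             (bStep
               ((PySem.List.sorted (PySem.Dict.ofList map).items (fun kv => kv.1) false).foldl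
                 (fun (t : Int × Int) pc => (t.1 + pc.2, t.2 + pc.1 * pc.2)) ((0 : Int), (0 : Int))).1
               ((PySem.List.sorted (PySem.Dict.ofList map).items (fun kv => kv.1) false).foldl
                 (fun (t : Int × Int) pc => (t.1 + pc.2, t.2 + pc.1 * pc.2)) ((0 : Int), (0 : Int))).2)
             ((PySem.Dict.empty : PySem.Dict Int Int), (0 : Int), (0 : Int))).1).getD k 0))) := rfl

theorem main_eq (map : List (Int × Int)) : calc_convergence map = calc_convergence_alt map := by
  rw [portA_eq, portB_eq]
  have hnd : (PySem.Dict.ofList map).keys.Nodup := PySem.Dict.nodup_keys_ofList map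
  have hkeys : (PySem.Dict.ofList map).keys = (PySem.Dict.ofList map).items.map (·.1) := rfl
  have hempty : (PySem.Dict.empty : PySem.Dict Int Int).items = [] := rfl
  have hperm : (PySem.List.sorted (PySem.Dict.ofList map).items (fun kv => kv.1) false).Perm
      (PySem.Dict.ofList map).items := PySem.List.sorted_perm _ _ _
  have hpair : (PySem.List.sorted (PySem.Dict.ofList map).items (fun kv => kv.1) false).Pairwise
      (fun a b => a.1 ≤ b.1) := PySem.List.sorted_pairwise _ _
  have hlen : (PySem.List.sorted (PySem.Dict.ofList map).items (fun kv => kv.1) false).length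
      = (PySem.Dict.ofList map).items.length := hperm.length_eq
  rw [outer_items _ _ _ hnd (fun k _ => PySem.Dict.contains_empty _), hempty, List.nil_append]
  by_cases h2 : (PySem.List.sorted (PySem.Dict.ofList map).items (fun kv => kv.1) false).length < 2
  · rw [if_pos h2]
    rw [hlen] at h2
    cases hI : (PySem.Dict.ofList map).items with
    | nil =>
      rw [hkeys, hI]
      simp
    | cons a t =>
      cases t with
      | nil =>
        rw [hkeys, hI]
        simp
      | cons b t' => rw [hI] at h2; simp at h2
  · rw [if_neg h2]
    rw [hlen] at h2
    obtain ⟨a, b, t, hI⟩ : ∃ a b t, (PySem.Dict.ofList map).items = a :: b :: t := by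
      cases hI : (PySem.Dict.ofList map).items with
      | nil => rw [hI] at h2; simp at h2
      | cons a t =>
        cases t with
        | nil => rw [hI] at h2; simp at h2
        | cons b t' => exact ⟨a, b, t', rfl⟩
    have hcond : ∀ k ∈ (PySem.Dict.ofList map).keys,
        ((PySem.Dict.ofList map).items.all (fun p => p.1 == k)) = false := by
      intro k hk
      cases hb : ((PySem.Dict.ofList map).items.all (fun p => p.1 == k)) with
      | false => rfl
      | true =>
      exfalso
      have hall : ∀ p ∈ (PySem.Dict.ofList map).items, p.1 = k := by
        intro p hp
        exact eq_of_beq (List.all_eq_true.mp hb p hp)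
      have hab : a.1 ≠ b.1 := by
        have := hkeys ▸ hnd
        rw [hI] at this
        simp only [List.map_cons, List.nodup_cons, List.mem_cons] at this
        exact fun h => this.1 (Or.inl h)
      exact hab ((hall a (by rw [hI]; simp)).trans (hall b (by rw [hI]; simp)).symm)
    rw [filterMap_eq_map_of_cond _ _ hcond]
    refine List.map_congr_left ?_
    intro k hk
    have hkm : k ∈ (PySem.List.sorted (PySem.Dict.ofList map).items (fun kv => kv.1) false).map (·.1) := by
      rw [List.mem_map]
      have : k ∈ (PySem.Dict.ofList map).items.map (·.1) := hkeys ▸ hk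
      obtain ⟨p, hp, hpk⟩ := List.mem_map.mp this
      exact ⟨p, hperm.mem_iff.mpr hp, hpk⟩
    obtain ⟨p, hpmem, hpk⟩ := List.mem_map.mp hkm
    subst hpk
    obtain ⟨L, R, hsplit⟩ := List.append_of_mem hpmem
    have hndits : ((PySem.List.sorted (PySem.Dict.ofList map).items (fun kv => kv.1) false).map (·.1)).Nodup :=
      ((hperm.map (·.1)).nodup_iff).mpr (hkeys ▸ hnd)
    have hkR : p.1 ∉ R.map (·.1) := by
      rw [hsplit] at hndits
      simp only [List.map_append, List.map_cons, List.nodup_append, List.nodup_cons] at hndits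
      exact hndits.2.1.1
    have hpairs := hpair
    rw [hsplit] at hpairs
    obtain ⟨-, hPR, hcross⟩ := List.pairwise_append.mp hpairs
    have hL : ∀ q ∈ L, q.1 ≤ p.1 := fun q hq => hcross q hq p (by simp)
    have hR : ∀ q ∈ R, p.1 ≤ q.1 := (List.pairwise_cons.mp hPR).1
    have hsum : sumAbs p.1 (PySem.Dict.ofList map).items
        = sumAbs p.1 (PySem.List.sorted (PySem.Dict.ofList map).items (fun kv => kv.1) false) :=
      ((hperm.map _).sum_eq).symm
    have htc : ((L ++ p :: R).foldl (fun (t : Int × Int) pc => (t.1 + pc.2, t.2 + pc.1 * pc.2))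
        ((0 : Int), (0 : Int))).1 = 0 + sumC (L ++ p :: R) := by rw [tot_foldl]
    have htw : ((L ++ p :: R).foldl (fun (t : Int × Int) pc => (t.1 + pc.2, t.2 + pc.1 * pc.2))
        ((0 : Int), (0 : Int))).2 = 0 + sumW (L ++ p :: R) := by rw [tot_foldl]
    refine Prod.ext rfl ?_
    simp only
    rw [hsum, hsplit, htc, htw, cost_split _ _ p L R hkR]
    have hCsplit : sumC (L ++ p :: R) = sumC L + p.2 + sumC R := by
      simp [sumC, List.map_append, List.sum_append]; ring
    have hWsplit : sumW (L ++ p :: R) = sumW L + p.1 * p.2 + sumW R := by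
      simp [sumW, List.map_append, List.sum_append]; ring
    have hAsplit : sumAbs p.1 (L ++ p :: R) = sumAbs p.1 L + sumAbs p.1 R := by
      simp [sumAbs, List.map_append, List.sum_append]
    rw [hAsplit, sumAbs_le p.1 L hL, sumAbs_ge p.1 R hR]
    simp only [hCsplit, hWsplit]
    ring

-- ===== VERDICT (by name: the statement is the Claim_ definition above) =====
theorem calc_convergence_spec : Claim_equal_calc_convergence := by
  intro map _
  unfold Spec_calc_convergence
  exact main_eq map
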